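-- pv_equiv track=rewrite | github.com/Mockingbird01001/NLG-code-generator-LSTM | work/data/data_model/batch_1/570.py.transformed.py.transformed.py | intranges_from_list
-- ===== SOURCE A (Python) =====
-- def intranges_from_list(list_):
--     sorted_list = sorted(list_)
--     ranges = []
--     last_write = -1
--     for i in range(len(sorted_list)):
--         if i+1 < len(sorted_list):
--             if sorted_list[i] == sorted_list[i+1]-1:
--                 continue
--         current_range = sorted_list[last_write+1:i+1]
--         ranges.append(_encode_range(current_range[0], current_range[-1] + 1))
--         last_write = i
--     return tuple(ranges)
--
-- def _encode_range(start, end):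
--     return (start << 32) | end
-- ===== SOURCE B (Python) =====
-- def intranges_from_list(list_):
--     s = sorted(list_)
--     n = len(s)
--     # staged passes: key v-i is constant exactly on a maximal run of consecutive
--     # integers (duplicates change the key, so each starts a new run)
--     keys = [v - i for i, v in enumerate(s)]
--     starts = [i for i in range(n) if i == 0 or keys[i] != keys[i - 1]]
--     ends = starts[1:] + [n]
--     return tuple((s[b] << 32) | (s[e - 1] + 1) for b, e in zip(starts, ends))
-- ===== Notes on version B (the rewrite author's own statement) =====
-- stated objective: alternative
-- what changed: Replaces A's stateful index scan (lookahead comparison of adjacent elements, last_write bookkeeping, per-range slicing) by staged declarative passes: a difference-key array v-i that is constant exactly on maximal consecutive runs, a boundary-index list where the key changes, and a zip of adjacent boundaries mapped to encoded ranges.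
import Mathlib
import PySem

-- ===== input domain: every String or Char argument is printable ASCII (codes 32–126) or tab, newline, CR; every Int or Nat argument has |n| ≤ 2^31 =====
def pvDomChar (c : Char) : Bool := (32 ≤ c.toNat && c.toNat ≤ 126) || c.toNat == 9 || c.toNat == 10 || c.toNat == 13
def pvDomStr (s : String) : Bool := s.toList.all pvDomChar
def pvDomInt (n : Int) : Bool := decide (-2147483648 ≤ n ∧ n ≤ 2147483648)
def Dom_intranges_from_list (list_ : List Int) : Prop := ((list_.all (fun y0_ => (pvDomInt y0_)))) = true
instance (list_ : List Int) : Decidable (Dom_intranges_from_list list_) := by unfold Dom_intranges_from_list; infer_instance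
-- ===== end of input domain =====

-- B replaces A's stateful index scan by staged passes (difference keys, boundary indices, zip of adjacent boundaries); same return value, no argument mutation.

-- ===== PORT A =====
-- helper _encode_range(start, end) = (start << 32) | end
def pvEncodeRange (start end_ : Int) : Int := PySem.Int.bor (start <<< (32 : Nat)) end_

def intranges_from_list (list_ : List Int) : List Int :=
  let sorted_list := PySem.List.sorted list_ (fun x => x) false
  -- the for-loop over range(len(sorted_list)) with state (ranges, last_write);
  -- sorted_list[i] / slice indexing ported with pyGetD (every access is in range: the slice is never empty)
  let res := (PySem.List.pyRange 0 sorted_list.length 1).foldl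
    (fun (st : List Int × Int) i =>
      if i + 1 < (sorted_list.length : Int) ∧
         PySem.List.pyGetD sorted_list i 0 = PySem.List.pyGetD sorted_list (i + 1) 0 - 1 then
        st  -- continue
      else
        let current_range := PySem.List.slice sorted_list (some (st.2 + 1)) (some (i + 1))
        (st.1 ++ [pvEncodeRange (PySem.List.pyGetD current_range 0 0)
                                (PySem.List.pyGetD current_range (-1) 0 + 1)], i))
    ([], -1)
  res.1

-- ===== PORT B =====
-- all list indices in B (i, i-1 guarded by i == 0, b, e-1) are nonnegative and in
-- range, so Nat-indexed List.getD / List.drop are exact ports of the Python accesses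
def intranges_from_list_alt (list_ : List Int) : List Int :=
  let s := PySem.List.sorted list_ (fun x => x) false
  let n := s.length
  let keys := (PySem.List.enumerate s).map (fun iv => iv.2 - iv.1)
  let starts := (List.range n).filter (fun i => i == 0 || keys.getD i 0 != keys.getD (i - 1) 0)
  let ends := starts.drop 1 ++ [n]
  (starts.zip ends).map (fun be => PySem.Int.bor ((s.getD be.1 0) <<< (32 : Nat)) (s.getD (be.2 - 1) 0 + 1))

-- ===== PRECONDITION & SPEC =====
def Spec_intranges_from_list (list_ : List Int) (out : List Int) : Prop := out = intranges_from_list_alt list_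
instance (list_ : List Int) (out : List Int) : Decidable (Spec_intranges_from_list list_ out) := by unfold Spec_intranges_from_list; infer_instance

-- ===== CLAIM (what is proved, stated in full; the proofs are below) =====
def Claim_equal_intranges_from_list : Prop := ∀ (list_ : List Int), Dom_intranges_from_list list_ → Spec_intranges_from_list list_ (intranges_from_list list_)

-- ===== LEMMAS AND PROOFS =====

-- common description of both programs: encoded maximal consecutive runs of the sorted list
def pvGrp : Int → Int → List Int → List Int
  | start, prev, [] => [pvEncodeRange start (prev + 1)]
  | start, prev, v :: t =>
    if v = prev + 1 then pvGrp start v t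
    else pvEncodeRange start (prev + 1) :: pvGrp v v t

-- ---------- A side ----------

-- A's loop body, named for the proofs
def pvAStep (s : List Int) (st : List Int × Int) (j : Int) : List Int × Int :=
  if j + 1 < (s.length : Int) ∧
     PySem.List.pyGetD s j 0 = PySem.List.pyGetD s (j + 1) 0 - 1 then
    st
  else
    let current_range := PySem.List.slice s (some (st.2 + 1)) (some (j + 1))
    (st.1 ++ [pvEncodeRange (PySem.List.pyGetD current_range 0 0)
                            (PySem.List.pyGetD current_range (-1) 0 + 1)], j)

-- the slice s[w:i+1] (w ≤ i < len) is nonempty with head s[w] and last s[i]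
lemma slice_head (s : List Int) (w i : Nat) (hw : w ≤ i) (hi : i < s.length) :
    ((s.drop w).take (i + 1 - w)).getD 0 0 = s.getD w 0 := by
  have h1 : 0 < ((s.drop w).take (i + 1 - w)).length := by
    simp [List.length_take, List.length_drop]; omega
  rw [List.getD_eq_getElem _ _ h1, List.getD_eq_getElem _ _ (lt_of_le_of_lt hw hi)]
  simp [List.getElem_take, List.getElem_drop]

lemma slice_last (s : List Int) (w i : Nat) (hw : w ≤ i) (hi : i < s.length)
    (h : (s.drop w).take (i + 1 - w) ≠ []) :
    ((s.drop w).take (i + 1 - w)).getLast h = s.getD i 0 := by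
  have hlen : ((s.drop w).take (i + 1 - w)).length = i + 1 - w := by
    simp [List.length_take, List.length_drop]; omega
  rw [List.getLast_eq_getElem, List.getD_eq_getElem _ _ hi]
  simp only [List.getElem_take, List.getElem_drop, hlen]
  congr 1
  omega

lemma a_loop_eq_grp (s : List Int) (t : List Int) : ∀ (i w : Nat) (acc : List Int),
    s.drop i = t → w ≤ i → i < s.length →
    ((PySem.List.pyRange (i : Int) (s.length : Int) 1).foldl (pvAStep s) (acc, (w : Int) - 1)).1
    = acc ++ pvGrp (s.getD w 0) (s.getD i 0) (s.drop (i + 1)) := by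
  induction t with
  | nil =>
    intro i w acc hdrop hw hi
    have := List.drop_eq_nil_iff.mp hdrop
    omega
  | cons v t ih =>
    intro i w acc hdrop hw hi
    have hiI : (i : Int) < (s.length : Int) := by exact_mod_cast hi
    have hdt : s.drop (i + 1) = t := by
      have h1 := congrArg List.tail hdrop
      simpa [List.tail_drop] using h1
    -- evaluate sorted_list[i], sorted_list[i+1] accesses
    have hgi : PySem.List.pyGetD s (i : Int) 0 = s.getD i 0 := by
      rw [PySem.List.pyGetD_natCast]
    have hgi1 : PySem.List.pyGetD s ((i : Int) + 1) 0 = s.getD (i + 1) 0 := by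
      rw [show (i : Int) + 1 = ((i + 1 : Nat) : Int) by push_cast; ring,
          PySem.List.pyGetD_natCast]
    -- the emitted range's value, used in both emit branches
    have hslice : PySem.List.slice s (some ((w : Int) - 1 + 1)) (some ((i : Int) + 1))
        = (s.drop w).take (i + 1 - w) := by
      rw [show (w : Int) - 1 + 1 = (w : Int) by ring,
          show (i : Int) + 1 = ((i + 1 : Nat) : Int) by push_cast; ring,
          PySem.List.slice_natCast]
    have hne : (s.drop w).take (i + 1 - w) ≠ [] := by
      intro hcon
      have := congrArg List.length hcon
      simp [List.length_take, List.length_drop] at this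
      omega
    have hfirst : PySem.List.pyGetD ((s.drop w).take (i + 1 - w)) 0 0 = s.getD w 0 := by
      rw [PySem.List.pyGetD_zero, slice_head s w i hw hi]
    have hlast : PySem.List.pyGetD ((s.drop w).take (i + 1 - w)) (-1) 0 = s.getD i 0 := by
      rw [PySem.List.pyGetD_neg_one (h := hne), slice_last s w i hw hi]
    rw [PySem.List.pyRange_one_cons hiI, List.foldl_cons]
    by_cases hn : i + 1 < s.length
    · have hnI : (i : Int) + 1 < (s.length : Int) := by exact_mod_cast hn
      have hdcons : s.drop (i + 1) = s.getD (i + 1) 0 :: s.drop (i + 2) := by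
        rw [List.drop_eq_getElem_cons hn, List.getD_eq_getElem _ _ hn]
      by_cases hc : s.getD i 0 = s.getD (i + 1) 0 - 1
      · -- continue branch: s[i] and s[i+1] are consecutive
        have hstep : pvAStep s (acc, (w : Int) - 1) (i : Int) = (acc, (w : Int) - 1) := by
          simp only [pvAStep]
          rw [if_pos ⟨hnI, by rw [hgi, hgi1]; exact hc⟩]
        rw [hstep, show (i : Int) + 1 = ((i + 1 : Nat) : Int) by push_cast; ring,
            ih (i + 1) w acc hdt (by omega) hn, hdcons]
        simp only [pvGrp, show i + 1 + 1 = i + 2 from rfl]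
        rw [if_pos (by omega)]
      · -- emit branch: range ends at i
        have hstep : pvAStep s (acc, (w : Int) - 1) (i : Int)
            = (acc ++ [pvEncodeRange (s.getD w 0) (s.getD i 0 + 1)], (i : Int)) := by
          simp only [pvAStep]
          rw [if_neg (by rw [hgi, hgi1]; tauto), hslice, hfirst, hlast]
        rw [hstep, show (i : Int) + 1 = ((i + 1 : Nat) : Int) by push_cast; ring,
            show (i : Int) = ((i + 1 : Nat) : Int) - 1 by push_cast; ring,
            ih (i + 1) (i + 1) _ hdt (by omega) hn, hdcons]
        simp only [pvGrp, show i + 1 + 1 = i + 2 from rfl]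
        rw [if_neg (by omega), List.append_assoc]
        rfl
    · -- last index: the loop ends after this emit
      have hn1 : i + 1 = s.length := by omega
      have hstep : pvAStep s (acc, (w : Int) - 1) (i : Int)
          = (acc ++ [pvEncodeRange (s.getD w 0) (s.getD i 0 + 1)], (i : Int)) := by
        simp only [pvAStep]
        rw [if_neg (by omega), hslice, hfirst, hlast]
      rw [hstep, PySem.List.pyRange_one_eq_nil (by omega), List.foldl_nil,
          show s.drop (i + 1) = [] from List.drop_eq_nil_iff.mpr (by omega)]
      simp [pvGrp]

-- ---------- B side ----------

-- boundary indices of the maximal consecutive runs of a (suffix of the) list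
def pvBnds : Int → Nat → List Int → List Nat
  | _, _, [] => []
  | prev, j, v :: xs => if v = prev + 1 then pvBnds v (j + 1) xs else j :: pvBnds v (j + 1) xs

-- the keys array at an in-range index
lemma keys_getD (s : List Int) (i : Nat) (h : i < s.length) :
    ((PySem.List.enumerate s).map (fun iv => iv.2 - iv.1)).getD i 0 = s.getD i 0 - i := by
  have h1 : i < ((PySem.List.enumerate s).map (fun iv => iv.2 - iv.1)).length := by
    simp [PySem.List.length_enumerate, h]
  rw [List.getD_eq_getElem _ _ h1, List.getD_eq_getElem _ _ h]
  simp [PySem.List.getElem_enumerate]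

-- the element at the head of a dropped suffix
lemma getD_of_drop (s : List Int) (j : Nat) (v : Int) (xs : List Int)
    (h : s.drop j = v :: xs) : s.getD j 0 = v := by
  have h0 : s[j + 0]? = some v := by rw [← List.getElem?_drop, h]; rfl
  simp only [Nat.add_zero] at h0
  simp [List.getD_eq_getElem?_getD, h0]

-- B's filtered range of indices equals the recursive boundary list
lemma filter_eq_bnds (s : List Int) (xs : List Int) : ∀ (j : Nat) (prev : Int),
    s.drop j = xs → 1 ≤ j → s.getD (j - 1) 0 = prev →
    (List.range' j xs.length).filter
      (fun i => i == 0 || ((PySem.List.enumerate s).map (fun iv => iv.2 - iv.1)).getD i 0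
                          != ((PySem.List.enumerate s).map (fun iv => iv.2 - iv.1)).getD (i - 1) 0)
    = pvBnds prev j xs := by
  induction xs with
  | nil => intro j prev _ _ _; simp [pvBnds]
  | cons v xs ih =>
    intro j prev hdrop hj hprev
    have hjlen : j < s.length := by
      by_contra hc
      rw [List.drop_eq_nil_iff.mpr (by omega)] at hdrop
      simp at hdrop
    have hv : s.getD j 0 = v := getD_of_drop s j v xs hdrop
    have hdt : s.drop (j + 1) = xs := by
      have h1 := congrArg List.tail hdrop
      simpa [List.tail_drop] using h1
    have hk1 : ((PySem.List.enumerate s).map (fun iv => iv.2 - iv.1)).getD j 0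
        = v - (j : Int) := by rw [keys_getD s j hjlen, hv]
    have hk2 : ((PySem.List.enumerate s).map (fun iv => iv.2 - iv.1)).getD (j - 1) 0
        = prev - ((j - 1 : Nat) : Int) := by
      rw [keys_getD s (j - 1) (by omega), hprev]
    have hcast : ((j - 1 : Nat) : Int) = (j : Int) - 1 := by omega
    rw [List.length_cons, List.range'_succ, List.filter_cons]
    by_cases hc : v = prev + 1
    · rw [if_neg (by
        simp only [hk1, hk2, hcast, Bool.or_eq_true, beq_iff_eq, bne_iff_ne]
        push Not
        constructor
        · omega
        · rw [hc]; ring)]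
      rw [ih (j + 1) v hdt (by omega) (by simpa using hv)]
      simp [pvBnds, hc]
    · rw [if_pos (by
        simp only [hk1, hk2, hcast, Bool.or_eq_true, beq_iff_eq, bne_iff_ne]
        right
        intro heq
        exact hc (by linarith [heq]))]
      rw [ih (j + 1) v hdt (by omega) (by simpa using hv)]
      simp [pvBnds, hc]

-- mapping the encoder over adjacent boundary pairs yields the encoded runs
lemma zip_bnds_eq_grp (s : List Int) (xs : List Int) : ∀ (j b : Nat) (prev : Int),
    s.drop j = xs → 1 ≤ j → j ≤ s.length → s.getD (j - 1) 0 = prev →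
    (((b :: pvBnds prev j xs).zip (pvBnds prev j xs ++ [s.length])).map
      (fun be => PySem.Int.bor ((s.getD be.1 0) <<< (32 : Nat)) (s.getD (be.2 - 1) 0 + 1)))
    = pvGrp (s.getD b 0) prev xs := by
  induction xs with
  | nil =>
    intro j b prev hdrop hj hjle hprev
    have hjn : j = s.length := by
      have := List.drop_eq_nil_iff.mp (by rw [hdrop])
      omega
    have hprev' : s[j - 1]?.getD 0 = prev := by
      simpa [List.getD_eq_getElem?_getD] using hprev
    simp [pvBnds, pvGrp, pvEncodeRange, ← hjn, hprev']
  | cons v xs ih =>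
    intro j b prev hdrop hj hjle hprev
    have hjlen : j < s.length := by
      by_contra hc
      rw [List.drop_eq_nil_iff.mpr (by omega)] at hdrop
      simp at hdrop
    have hv : s.getD j 0 = v := getD_of_drop s j v xs hdrop
    have hdt : s.drop (j + 1) = xs := by
      have h1 := congrArg List.tail hdrop
      simpa [List.tail_drop] using h1
    by_cases hc : v = prev + 1
    · rw [show pvBnds prev j (v :: xs) = pvBnds v (j + 1) xs by simp [pvBnds, hc]]
      rw [ih (j + 1) b v hdt (by omega) (by omega) (by simpa using hv)]
      simp [pvGrp, hc]
    · rw [show pvBnds prev j (v :: xs) = j :: pvBnds v (j + 1) xs by simp [pvBnds, hc]]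
      rw [show (b :: j :: pvBnds v (j + 1) xs).zip ((j :: pvBnds v (j + 1) xs) ++ [s.length])
            = (b, j) :: ((j :: pvBnds v (j + 1) xs).zip (pvBnds v (j + 1) xs ++ [s.length]))
          from rfl]
      rw [List.map_cons, ih (j + 1) j v hdt (by omega) (by omega) (by simpa using hv)]
      have hprev' : s[j - 1]?.getD 0 = prev := by
        simpa [List.getD_eq_getElem?_getD] using hprev
      have hv' : s[j]?.getD 0 = v := by
        simpa [List.getD_eq_getElem?_getD] using hv
      simp [pvGrp, hc, hprev', hv', pvEncodeRange]

-- ===== VERDICT (by name: the statement is the Claim_ definition above) =====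
theorem intranges_from_list_spec : Claim_equal_intranges_from_list := by
  intro list_ _
  show intranges_from_list list_ = intranges_from_list_alt list_
  rw [intranges_from_list, intranges_from_list_alt]
  cases hs : PySem.List.sorted list_ (fun x => x) false with
  | nil => simp [PySem.List.pyRange_one_eq_nil]
  | cons h t =>
    -- A's loop computes the encoded runs
    have hA := a_loop_eq_grp (h :: t) (h :: t) 0 0 [] rfl (le_refl 0) (by simp)
    norm_num at hA
    -- B's staged passes compute the same encoded runs
    have hF := filter_eq_bnds (h :: t) t 1 h rfl (le_refl 1) rfl
    have hrange : List.range (h :: t).length = 0 :: List.range' 1 t.length := by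
      rw [List.range_eq_range', List.length_cons, List.range'_succ]
    have hZ := zip_bnds_eq_grp (h :: t) t 1 0 h rfl (le_refl 1) (by simp) rfl
    simp only [hrange, List.filter_cons]
    rw [if_pos (by simp)]
    rw [show (List.range' 1 t.length).filter _ = pvBnds h 1 t from hF]
    simp only [List.drop_one, List.tail_cons]
    rw [show ((0 :: pvBnds h 1 t).zip (pvBnds h 1 t ++ [(h :: t).length])).map _
          = pvGrp ((h :: t).getD 0 0) h t from hZ,
        show (h :: t).getD 0 0 = h from rfl]
    exact hA
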